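-- pv_equiv track=rewrite | github.com/drsagitn/practicePythonAZ | a.py | selectPairs
-- ===== SOURCE A (Python) =====
-- def selectPairs(targetDuration, arr):
--     ret = []
--     n = len(arr)
--     for i in range(0, n):
--         for j in range(i + 1, n):
--             if (arr[i] + arr[j] == targetDuration):
--                 if (len(ret) <= 0 or max(arr[i], arr[j]) > max(arr[ret[0]], arr[ret[1]])):
--                     ret = [i, j]
--     return ret
-- ===== SOURCE B (Python) =====
-- def selectPairs(targetDuration, arr):
--     first = {}
--     best = []
--     for j in range(len(arr)):
--         v = arr[j]
--         c = targetDuration - v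
--         if c in first:
--             if not best or max(v, c) > max(arr[best[0]], arr[best[1]]):
--                 best = [first[c], j]
--         if v not in first:
--             first[v] = j
--     return best
-- ===== Notes on version B (the rewrite author's own statement) =====
-- stated objective: faster
-- what changed: Replaced the O(n^2) double loop over index pairs by a single pass that keeps a hash map from value to its first index, so each element is checked once against the earliest occurrence of its complement.
import Mathlib
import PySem

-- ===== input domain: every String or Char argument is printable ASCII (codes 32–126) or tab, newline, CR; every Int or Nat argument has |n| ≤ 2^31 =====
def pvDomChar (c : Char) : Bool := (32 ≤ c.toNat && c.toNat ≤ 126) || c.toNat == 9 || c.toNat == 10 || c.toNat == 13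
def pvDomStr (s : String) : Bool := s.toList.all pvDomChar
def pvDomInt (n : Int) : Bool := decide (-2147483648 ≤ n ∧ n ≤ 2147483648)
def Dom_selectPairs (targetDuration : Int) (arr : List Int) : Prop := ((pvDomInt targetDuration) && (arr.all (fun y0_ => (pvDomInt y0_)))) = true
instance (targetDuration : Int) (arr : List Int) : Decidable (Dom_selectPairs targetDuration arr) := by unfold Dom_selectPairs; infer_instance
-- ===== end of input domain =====

-- B replaces A's O(n^2) double loop by a single pass with a hash map from value to first index; return values are identical.

-- ===== PORT A =====
-- body of A's inner loop (over j), as in the Python source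
def pvBodyA (targetDuration : Int) (arr : List Int) (i : Int) (ret : List Int) (j : Int) : List Int :=
  if PySem.List.pyGetD arr i 0 + PySem.List.pyGetD arr j 0 = targetDuration then
    if PySem.List.len ret ≤ 0 ∨
        max (PySem.List.pyGetD arr i 0) (PySem.List.pyGetD arr j 0) >
          max (PySem.List.pyGetD arr (PySem.List.pyGetD ret 0 0) 0)
              (PySem.List.pyGetD arr (PySem.List.pyGetD ret 1 0) 0) then
      [i, j]
    else ret
  else ret

def selectPairs (targetDuration : Int) (arr : List Int) : List Int :=
  let n := PySem.List.len arr
  (PySem.List.pyRange 0 n 1).foldl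
    (fun ret i => (PySem.List.pyRange (i + 1) n 1).foldl (pvBodyA targetDuration arr i) ret)
    []

-- ===== PORT B =====
-- body of B's single loop (over j): state = (first-index dict, best pair as a list)
def pvBodyB (targetDuration : Int) (arr : List Int) (st : PySem.Dict Int Int × List Int) (j : Int) :
    PySem.Dict Int Int × List Int :=
  let v := PySem.List.pyGetD arr j 0
  let c := targetDuration - v
  let best :=
    if st.1.contains c then
      if PySem.List.len st.2 = 0 ∨
          max v c > max (PySem.List.pyGetD arr (PySem.List.pyGetD st.2 0 0) 0)
                        (PySem.List.pyGetD arr (PySem.List.pyGetD st.2 1 0) 0) then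
        [st.1.getD c 0, j]
      else st.2
    else st.2
  let first := if st.1.contains v then st.1 else st.1.insert v j
  (first, best)

def selectPairs_alt (targetDuration : Int) (arr : List Int) : List Int :=
  ((PySem.List.pyRange 0 (PySem.List.len arr) 1).foldl (pvBodyB targetDuration arr)
    (PySem.Dict.empty, [])).2

-- ===== PRECONDITION & SPEC =====
def Spec_selectPairs (targetDuration : Int) (arr : List Int) (out : List Int) : Prop := out = selectPairs_alt targetDuration arr
instance (targetDuration : Int) (arr : List Int) (out : List Int) : Decidable (Spec_selectPairs targetDuration arr out) := by unfold Spec_selectPairs; infer_instance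

-- ===== CLAIM (what is proved, stated in full; the proofs are below) =====
def Claim_equal_selectPairs : Prop := ∀ (targetDuration : Int) (arr : List Int), Dom_selectPairs targetDuration arr → Spec_selectPairs targetDuration arr (selectPairs targetDuration arr)

-- ===== LEMMAS AND PROOFS =====

-- value at a (Nat) index, total since out-of-range indices are never reached
def pvG (arr : List Int) (i : Nat) : Int := arr.getD i 0
-- the quantity both programs maximise
def pvKey (arr : List Int) (p : Nat × Nat) : Int := max (pvG arr p.1) (pvG arr p.2)
-- the common "keep the strictly better pair" step
def pvStep (arr : List Int) (r : Option (Nat × Nat)) (p : Nat × Nat) : Option (Nat × Nat) :=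
  match r with
  | none => some p
  | some q => if pvKey arr q < pvKey arr p then some p else some q
def pvBest (arr : List Int) (ps : List (Nat × Nat)) : Option (Nat × Nat) := ps.foldl (pvStep arr) none
def pvToRet : Option (Nat × Nat) → List Int
  | none => []
  | some (i, j) => [(i : Int), (j : Int)]

-- the candidate pairs A scans, in A's order
def pvJs (n i : Nat) : List Nat := (List.range (n - (i + 1))).map (fun k => i + 1 + k)
def pvRowA (t : Int) (arr : List Int) (i : Nat) (js : List Nat) : List (Nat × Nat) :=
  (js.filter (fun j => pvG arr i + pvG arr j == t)).map (fun j => (i, j))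
def pvPairsA (t : Int) (arr : List Int) : List (Nat × Nat) :=
  (List.range arr.length).flatMap (fun i => pvRowA t arr i (pvJs arr.length i))

-- the candidate pairs B scans, in B's order
def pvF (t : Int) (arr : List Int) (j : Nat) : Option (Nat × Nat) :=
  ((List.range j).find? (fun i => pvG arr i == t - pvG arr j)).map (fun i => (i, j))
def pvPairsBU (t : Int) (arr : List Int) (m : Nat) : List (Nat × Nat) :=
  (List.range m).filterMap (pvF t arr)

-- dict invariant: `first` maps each value to its first index in the scanned prefix
def pvDinv (arr : List Int) (j : Nat) (d : PySem.Dict Int Int) : Prop :=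
  ∀ v, d.get? v = ((List.range j).find? (fun i => pvG arr i == v)).map (fun (i : Nat) => (i : Int))

lemma pvGetD_nat (arr : List Int) (k : Nat) :
    PySem.List.pyGetD arr ((k : Nat) : Int) 0 = pvG arr k := by
  simp [pvG, List.getD_eq_getElem?_getD]

set_option maxHeartbeats 1000000 in
lemma pvBodyA_toRet (t : Int) (arr : List Int) (i j : Nat) (r : Option (Nat × Nat)) :
    pvBodyA t arr (i : Int) (pvToRet r) (j : Int)
      = pvToRet (if pvG arr i + pvG arr j == t then pvStep arr r (i, j) else r) := by
  unfold pvBodyA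
  rw [pvGetD_nat arr i, pvGetD_nat arr j]
  by_cases hsum : pvG arr i + pvG arr j = t
  · rw [if_pos hsum]
    cases r with
    | none =>
      have hlen : PySem.List.len (pvToRet none) ≤ 0 := by simp [pvToRet, pysem]
      rw [if_pos (Or.inl hlen)]
      simp [pvStep, pvToRet, hsum]
    | some pq =>
      obtain ⟨p, q⟩ := pq
      have e0 : PySem.List.pyGetD (pvToRet (some (p, q))) 0 0 = ((p : Nat) : Int) := by
        simp [pvToRet, pysem]
      have e2 : PySem.List.pyGetD (pvToRet (some (p, q))) 1 0 = ((q : Nat) : Int) := by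
        simp [pvToRet, pysem]
      rw [e0, e2, pvGetD_nat arr p, pvGetD_nat arr q]
      have hlen : ¬ PySem.List.len (pvToRet (some (p, q))) ≤ 0 := by simp [pvToRet, pysem]
      by_cases hcmp : pvKey arr (p, q) < pvKey arr (i, j)
      · have hcond : PySem.List.len (pvToRet (some (p, q))) ≤ 0 ∨
            max (pvG arr i) (pvG arr j) > max (pvG arr p) (pvG arr q) := Or.inr hcmp
        rw [if_pos hcond]
        simp [pvStep, pvToRet, hsum, hcmp]
      · have hcond : ¬ (PySem.List.len (pvToRet (some (p, q))) ≤ 0 ∨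
            max (pvG arr i) (pvG arr j) > max (pvG arr p) (pvG arr q)) :=
          not_or.mpr ⟨hlen, fun h => hcmp h⟩
        rw [if_neg hcond]
        simp [pvStep, pvToRet, hsum, hcmp]
  · rw [if_neg hsum, if_neg (by simpa using hsum)]

lemma pvA_inner (t : Int) (arr : List Int) (i : Nat) (js : List Nat) (r : Option (Nat × Nat)) :
    (List.map (fun (k : Nat) => (k : Int)) js).foldl (pvBodyA t arr (i : Int)) (pvToRet r)
      = pvToRet ((pvRowA t arr i js).foldl (pvStep arr) r) := by
  induction js generalizing r with
  | nil => simp [pvRowA]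
  | cons j js' ih =>
    rw [List.map_cons, List.foldl_cons, pvBodyA_toRet]
    by_cases hsum : pvG arr i + pvG arr j = t
    · rw [if_pos (by simpa using hsum), ih (pvStep arr r (i, j))]
      congr 1
      simp only [pvRowA, List.filter_cons]
      rw [if_pos (by simpa using hsum)]
      simp
    · rw [if_neg (by simpa using hsum), ih r]
      congr 1
      simp only [pvRowA, List.filter_cons]
      rw [if_neg (by simpa using hsum)]

lemma pvJs_eq (n i : Nat) :
    PySem.List.pyRange ((i : Int) + 1) (n : Int) 1 = List.map (fun (k : Nat) => (k : Int)) (pvJs n i) := by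
  rw [PySem.List.pyRange_one]
  unfold pvJs
  rw [List.map_map]
  have hn : ((n : Int) - ((i : Int) + 1)).toNat = n - (i + 1) := by omega
  rw [hn]
  apply List.map_congr_left
  intro k _
  simp only [Function.comp_apply]
  push_cast
  ring

lemma pvA_eq (t : Int) (arr : List Int) :
    selectPairs t arr = pvToRet (pvBest arr (pvPairsA t arr)) := by
  unfold selectPairs
  simp only [PySem.List.len_eq]
  rw [PySem.List.pyRange_zero_nat]
  unfold pvBest pvPairsA
  have main : ∀ (is : List Nat) (r : Option (Nat × Nat)),
      ((is.map (fun (k : Nat) => (k : Int))).foldl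
        (fun ret i => (PySem.List.pyRange (i + 1) (arr.length : Int) 1).foldl (pvBodyA t arr i) ret)
        (pvToRet r))
      = pvToRet ((is.flatMap (fun i => pvRowA t arr i (pvJs arr.length i))).foldl (pvStep arr) r) := by
    intro is
    induction is with
    | nil => intro r; simp
    | cons i is' ih =>
      intro r
      rw [List.map_cons, List.foldl_cons, List.flatMap_cons, List.foldl_append]
      rw [pvJs_eq arr.length i, pvA_inner t arr i (pvJs arr.length i) r]
      exact ih _
  have := main (List.range arr.length) none
  simpa using this

set_option maxHeartbeats 2000000 in
lemma pvB_step (t : Int) (arr : List Int) (j : Nat) (d : PySem.Dict Int Int)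
    (r : Option (Nat × Nat)) (hd : pvDinv arr j d) :
    pvDinv arr (j + 1) (pvBodyB t arr (d, pvToRet r) (j : Int)).1 ∧
    (pvBodyB t arr (d, pvToRet r) (j : Int)).2
      = pvToRet ((pvF t arr j).toList.foldl (pvStep arr) r) := by
  have hv : PySem.List.pyGetD arr ((j : Nat) : Int) 0 = pvG arr j := pvGetD_nat arr j
  unfold pvBodyB
  simp only [hv]
  have hcontains : ∀ w : Int, d.contains w
      = ((List.range j).find? (fun i => pvG arr i == w)).isSome := by
    intro w
    rw [PySem.Dict.contains_eq_isSome_get?, hd w]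
    cases (List.range j).find? (fun i => pvG arr i == w) <;> simp
  have hsingle : ∀ w : Int, List.find? (fun i => pvG arr i == w) [j]
      = if pvG arr j = w then some j else none := by
    intro w
    by_cases hw : pvG arr j = w
    · simp [List.find?, hw]
    · have hb : (pvG arr j == w) = false := beq_eq_false_iff_ne.mpr hw
      simp [List.find?, hb, hw]
  constructor
  · -- the dict invariant is preserved
    intro w
    rw [List.range_succ, List.find?_append, hsingle w]
    by_cases hw : pvG arr j = w
    · rw [if_pos hw]
      by_cases hcv : d.contains (pvG arr j) = true
      · rw [if_pos hcv]
        have hks := hcontains (pvG arr j)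
        rw [hcv] at hks
        cases hf : (List.range j).find? (fun i => pvG arr i == pvG arr j) with
        | none => rw [hf] at hks; simp at hks
        | some i1 =>
          rw [hd w, ← hw, hf]
          simp
      · rw [if_neg hcv]
        have hnone : (List.range j).find? (fun i => pvG arr i == w) = none := by
          have hks := hcontains (pvG arr j)
          simp only [Bool.not_eq_true] at hcv
          rw [hcv, hw] at hks
          cases hf : (List.range j).find? (fun i => pvG arr i == w) with
          | none => rfl
          | some i1 => rw [hf] at hks; simp at hks
        rw [hnone, PySem.Dict.get?_insert, if_pos hw.symm]
        simp
    · rw [if_neg hw, Option.or_none]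
      by_cases hcv : d.contains (pvG arr j) = true
      · rw [if_pos hcv]; exact hd w
      · rw [if_neg hcv, PySem.Dict.get?_insert, if_neg (fun h => hw h.symm)]
        exact hd w
  · -- the best-pair component follows B's candidate list
    cases hfc : (List.range j).find? (fun i => pvG arr i == t - pvG arr j) with
    | none =>
      have hcf : d.contains (t - pvG arr j) = false := by rw [hcontains, hfc]; rfl
      rw [if_neg (by simp [hcf])]
      have : pvF t arr j = none := by simp [pvF, hfc]
      simp [this]
    | some i0 =>
      have hct : d.contains (t - pvG arr j) = true := by rw [hcontains, hfc]; rfl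
      rw [if_pos hct]
      have hgd : d.getD (t - pvG arr j) 0 = ((i0 : Nat) : Int) := by
        rw [PySem.Dict.getD_eq_get?_getD, hd (t - pvG arr j), hfc]; rfl
      have hgi0 : pvG arr i0 = t - pvG arr j := by simpa using List.find?_some hfc
      have hF : pvF t arr j = some (i0, j) := by simp [pvF, hfc]
      have hkey : max (pvG arr j) (t - pvG arr j) = pvKey arr (i0, j) := by
        rw [pvKey]; simp only [hgi0]; exact max_comm _ _
      rw [hF]
      cases r with
      | none =>
        have hlen : PySem.List.len (pvToRet none) = 0 := by simp [pvToRet, pysem]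
        rw [if_pos (Or.inl hlen), hgd]
        simp [pvToRet, pvStep]
      | some pq =>
        obtain ⟨p, q⟩ := pq
        have e0 : PySem.List.pyGetD (pvToRet (some (p, q))) 0 0 = ((p : Nat) : Int) := by
          simp [pvToRet, pysem]
        have e2 : PySem.List.pyGetD (pvToRet (some (p, q))) 1 0 = ((q : Nat) : Int) := by
          simp [pvToRet, pysem]
        have hlen : ¬ PySem.List.len (pvToRet (some (p, q))) = 0 := by simp [pvToRet, pysem]
        rw [e0, e2, pvGetD_nat arr p, pvGetD_nat arr q, hkey]
        by_cases hcmp : pvKey arr (p, q) < pvKey arr (i0, j)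
        · have hcond : PySem.List.len (pvToRet (some (p, q))) = 0 ∨
              pvKey arr (i0, j) > max (pvG arr p) (pvG arr q) := Or.inr hcmp
          rw [if_pos hcond, hgd]
          simp [pvToRet, pvStep, hcmp]
        · have hcond : ¬ (PySem.List.len (pvToRet (some (p, q))) = 0 ∨
              pvKey arr (i0, j) > max (pvG arr p) (pvG arr q)) :=
            not_or.mpr ⟨hlen, fun h => hcmp h⟩
          rw [if_neg hcond]
          simp [pvToRet, pvStep, hcmp]

lemma pvB_fold (t : Int) (arr : List Int) (m : Nat) :
    pvDinv arr m ((List.map (fun (k : Nat) => (k : Int)) (List.range m)).foldl (pvBodyB t arr) (PySem.Dict.empty, [])).1 ∧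
    ((List.map (fun (k : Nat) => (k : Int)) (List.range m)).foldl (pvBodyB t arr) (PySem.Dict.empty, [])).2
      = pvToRet (pvBest arr (pvPairsBU t arr m)) := by
  induction m with
  | zero =>
    constructor
    · intro v; simp [PySem.Dict.get?_empty]
    · simp [pvPairsBU, pvBest, pvToRet]
  | succ m ih =>
    obtain ⟨ihd, ihb⟩ := ih
    rw [List.range_succ, List.map_append, List.foldl_append]
    set st := (List.map (fun (k : Nat) => (k : Int)) (List.range m)).foldl (pvBodyB t arr)
      (PySem.Dict.empty, []) with hst
    have hstep := pvB_step t arr m st.1 (pvBest arr (pvPairsBU t arr m)) ihd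
    rw [← ihb] at hstep
    have hpairs : pvPairsBU t arr (m + 1)
        = pvPairsBU t arr m ++ (pvF t arr m).toList := by
      unfold pvPairsBU
      rw [List.range_succ, List.filterMap_append]
      cases hF : pvF t arr m <;> simp [hF]
    constructor
    · simpa using hstep.1
    · rw [hpairs]
      unfold pvBest
      rw [List.foldl_append]
      have h2 := hstep.2
      simpa using h2

lemma pvB_eq (t : Int) (arr : List Int) :
    selectPairs_alt t arr = pvToRet (pvBest arr (pvPairsBU t arr arr.length)) := by
  unfold selectPairs_alt
  simp only [PySem.List.len_eq]
  rw [PySem.List.pyRange_zero_nat]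
  exact (pvB_fold t arr arr.length).2

-- fold facts
lemma pvBest_keep (arr : List Int) (ps : List (Nat × Nat)) (y : Nat × Nat)
    (h : ∀ x ∈ ps, pvKey arr x ≤ pvKey arr y) : ps.foldl (pvStep arr) (some y) = some y := by
  induction ps with
  | nil => rfl
  | cons x rest ih =>
    have hx : ¬ pvKey arr y < pvKey arr x := not_lt.mpr (h x (by simp))
    simp only [List.foldl_cons, pvStep, if_neg hx]
    exact ih (fun q hq => h q (by simp [hq]))

lemma pvBest_start_some (arr : List Int) (ps : List (Nat × Nat)) (y : Nat × Nat) :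
    ∃ q, ps.foldl (pvStep arr) (some y) = some q ∧ pvKey arr y ≤ pvKey arr q := by
  induction ps generalizing y with
  | nil => exact ⟨y, rfl, le_refl _⟩
  | cons x rest ih =>
    simp only [List.foldl_cons, pvStep]
    by_cases hx : pvKey arr y < pvKey arr x
    · rw [if_pos hx]
      obtain ⟨q, hq, hk⟩ := ih x
      exact ⟨q, hq, le_of_lt (lt_of_lt_of_le hx hk)⟩
    · rw [if_neg hx]; exact ih y

lemma pvBest_none_iff (arr : List Int) (ps : List (Nat × Nat)) :
    ps.foldl (pvStep arr) none = none ↔ ps = [] := by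
  constructor
  · intro h
    cases ps with
    | nil => rfl
    | cons x rest =>
      simp only [List.foldl_cons, pvStep] at h
      obtain ⟨q, hq, _⟩ := pvBest_start_some arr rest x
      rw [hq] at h; exact absurd h (by simp)
  · rintro rfl; rfl

lemma pvBest_ub' (arr : List Int) (ps : List (Nat × Nat)) (y q : Nat × Nat)
    (h : ps.foldl (pvStep arr) (some y) = some q) :
    pvKey arr y ≤ pvKey arr q ∧ ∀ x ∈ ps, pvKey arr x ≤ pvKey arr q := by
  induction ps generalizing y with
  | nil =>
    simp only [List.foldl_nil, Option.some.injEq] at h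
    subst h; exact ⟨le_refl _, by simp⟩
  | cons x rest ih =>
    simp only [List.foldl_cons, pvStep] at h
    by_cases hx : pvKey arr y < pvKey arr x
    · rw [if_pos hx] at h
      obtain ⟨h1, h2⟩ := ih x h
      refine ⟨le_of_lt (lt_of_lt_of_le hx h1), ?_⟩
      intro z hz
      rcases List.mem_cons.mp hz with rfl | hz
      · exact h1
      · exact h2 z hz
    · rw [if_neg hx] at h
      obtain ⟨h1, h2⟩ := ih y h
      refine ⟨h1, ?_⟩
      intro z hz
      rcases List.mem_cons.mp hz with rfl | hz
      · exact le_trans (not_lt.mp hx) h1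
      · exact h2 z hz

lemma pvBest_ub (arr : List Int) (ps : List (Nat × Nat)) (q : Nat × Nat)
    (h : ps.foldl (pvStep arr) none = some q) : ∀ x ∈ ps, pvKey arr x ≤ pvKey arr q := by
  cases ps with
  | nil => intro x hx; simp at hx
  | cons x rest =>
    simp only [List.foldl_cons, pvStep] at h
    obtain ⟨h1, h2⟩ := pvBest_ub' arr rest x q h
    intro z hz
    rcases List.mem_cons.mp hz with rfl | hz
    · exact h1
    · exact h2 z hz

lemma pvBest_first' (arr : List Int) (R : Nat × Nat → Nat × Nat → Prop)
    (ps : List (Nat × Nat)) (p r : Nat × Nat)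
    (hp : ps.Pairwise R) (hmem : p ∈ ps)
    (hlt : ∀ q ∈ ps, R q p → pvKey arr q < pvKey arr p)
    (hub : ∀ q ∈ ps, pvKey arr q ≤ pvKey arr p)
    (hr : pvKey arr r < pvKey arr p) :
    ps.foldl (pvStep arr) (some r) = some p := by
  induction ps generalizing r with
  | nil => simp at hmem
  | cons x rest ih =>
    simp only [List.foldl_cons, pvStep]
    rcases List.pairwise_cons.mp hp with ⟨hxR, hrest⟩
    by_cases hxp : x = p
    · subst hxp
      rw [if_pos hr]
      exact pvBest_keep arr rest x (fun z hz => hub z (by simp [hz]))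
    · have hpm : p ∈ rest := (List.mem_cons.mp hmem).resolve_left (fun h => hxp h.symm)
      have hxlt : pvKey arr x < pvKey arr p := hlt x (by simp) (hxR p hpm)
      by_cases hc : pvKey arr r < pvKey arr x
      · rw [if_pos hc]
        exact ih x hrest hpm (fun q hq hRq => hlt q (by simp [hq]) hRq)
          (fun q hq => hub q (by simp [hq])) hxlt
      · rw [if_neg hc]
        exact ih r hrest hpm (fun q hq hRq => hlt q (by simp [hq]) hRq)
          (fun q hq => hub q (by simp [hq])) hr

lemma pvBest_first (arr : List Int) (R : Nat × Nat → Nat × Nat → Prop)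
    (ps : List (Nat × Nat)) (p : Nat × Nat)
    (hp : ps.Pairwise R) (hmem : p ∈ ps)
    (hlt : ∀ q ∈ ps, R q p → pvKey arr q < pvKey arr p)
    (hub : ∀ q ∈ ps, pvKey arr q ≤ pvKey arr p) :
    ps.foldl (pvStep arr) none = some p := by
  cases ps with
  | nil => simp at hmem
  | cons x rest =>
    simp only [List.foldl_cons, pvStep]
    rcases List.pairwise_cons.mp hp with ⟨hxR, hrest⟩
    by_cases hxp : x = p
    · subst hxp
      exact pvBest_keep arr rest x (fun z hz => hub z (by simp [hz]))
    · have hpm : p ∈ rest := (List.mem_cons.mp hmem).resolve_left (fun h => hxp h.symm)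
      have hxlt : pvKey arr x < pvKey arr p := hlt x (by simp) (hxR p hpm)
      exact pvBest_first' arr R rest p x hrest hpm
        (fun q hq hRq => hlt q (by simp [hq]) hRq)
        (fun q hq => hub q (by simp [hq])) hxlt

lemma pvBest_decomp' (arr : List Int) (ps : List (Nat × Nat)) (y p : Nat × Nat)
    (h : ps.foldl (pvStep arr) (some y) = some p) :
    p = y ∨ ∃ l1 l2, ps = l1 ++ p :: l2 ∧ (∀ q ∈ l1, pvKey arr q < pvKey arr p) ∧
      pvKey arr y < pvKey arr p := by
  induction ps generalizing y with
  | nil => simp only [List.foldl_nil, Option.some.injEq] at h; exact Or.inl h.symm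
  | cons x rest ih =>
    simp only [List.foldl_cons, pvStep] at h
    by_cases hc : pvKey arr y < pvKey arr x
    · rw [if_pos hc] at h
      rcases ih x h with rfl | ⟨l1, l2, hps, hl1, hy⟩
      · exact Or.inr ⟨[], rest, rfl, by simp, hc⟩
      · refine Or.inr ⟨x :: l1, l2, by simp [hps], ?_, lt_trans hc hy⟩
        intro q hq
        rcases List.mem_cons.mp hq with rfl | hq
        · exact hy
        · exact hl1 q hq
    · rw [if_neg hc] at h
      rcases ih y h with rfl | ⟨l1, l2, hps, hl1, hy⟩
      · exact Or.inl rfl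
      · refine Or.inr ⟨x :: l1, l2, by simp [hps], ?_, hy⟩
        intro q hq
        rcases List.mem_cons.mp hq with rfl | hq
        · exact lt_of_le_of_lt (not_lt.mp hc) hy
        · exact hl1 q hq

lemma pvBest_decomp (arr : List Int) (ps : List (Nat × Nat)) (p : Nat × Nat)
    (h : ps.foldl (pvStep arr) none = some p) :
    ∃ l1 l2, ps = l1 ++ p :: l2 ∧ ∀ q ∈ l1, pvKey arr q < pvKey arr p := by
  cases ps with
  | nil => simp at h
  | cons x rest =>
    simp only [List.foldl_cons, pvStep] at h
    rcases pvBest_decomp' arr rest x p h with rfl | ⟨l1, l2, hps, hl1, hy⟩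
    · exact ⟨[], rest, rfl, by simp⟩
    · refine ⟨x :: l1, l2, by simp [hps], ?_⟩
      intro q hq
      rcases List.mem_cons.mp hq with rfl | hq
      · exact hy
      · exact hl1 q hq

-- membership / structure of the two pair lists
lemma pvMemA (t : Int) (arr : List Int) (p : Nat × Nat) :
    p ∈ pvPairsA t arr ↔ p.1 < p.2 ∧ p.2 < arr.length ∧ pvG arr p.1 + pvG arr p.2 = t := by
  constructor
  · intro h
    simp only [pvPairsA, List.mem_flatMap, List.mem_range] at h
    obtain ⟨i, hi, hmem⟩ := h
    simp only [pvRowA, List.mem_map, List.mem_filter, pvJs, List.mem_map, List.mem_range] at hmem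
    obtain ⟨j, ⟨⟨k, hk, rfl⟩, hsum⟩, rfl⟩ := hmem
    exact ⟨by omega, by omega, by simpa using hsum⟩
  · rintro ⟨h1, h2, h3⟩
    simp only [pvPairsA, List.mem_flatMap, List.mem_range]
    refine ⟨p.1, by omega, ?_⟩
    simp only [pvRowA, List.mem_map, List.mem_filter, pvJs, List.mem_map, List.mem_range]
    exact ⟨p.2, ⟨⟨p.2 - (p.1 + 1), by omega, by omega⟩, by simpa using h3⟩, rfl⟩

lemma pvFind_range_min (j : Nat) (f : Nat → Bool) (i0 : Nat)
    (h : (List.range j).find? f = some i0) : ∀ i' < i0, f i' = false := by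
  induction j with
  | zero => simp at h
  | succ m ih =>
    rw [List.range_succ, List.find?_append] at h
    cases hfm : (List.range m).find? f with
    | some i1 =>
      rw [hfm, Option.some_or] at h
      obtain rfl := Option.some_injective _ h
      exact ih hfm
    | none =>
      rw [hfm] at h
      simp only [Option.none_or] at h
      have : i0 = m := by
        cases hs : List.find? f [m] with
        | none => rw [hs] at h; simp at h
        | some z =>
          rw [hs] at h
          have := List.find?_some hs
          have hz : z ∈ [m] := List.mem_of_find?_eq_some hs
          simp at hz h
          omega
      subst this
      intro i' hi'
      have := List.find?_eq_none.mp hfm i' (by simp [List.mem_range]; omega)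
      simpa using this

lemma pvMemB (t : Int) (arr : List Int) (m : Nat) (p : Nat × Nat) (h : p ∈ pvPairsBU t arr m) :
    p.2 < m ∧ (List.range p.2).find? (fun i => pvG arr i == t - pvG arr p.2) = some p.1 := by
  simp only [pvPairsBU, List.mem_filterMap, List.mem_range] at h
  obtain ⟨j, hj, hF⟩ := h
  simp only [pvF, Option.map_eq_some_iff] at hF
  obtain ⟨i0, hfind, rfl⟩ := hF
  exact ⟨hj, hfind⟩

lemma pvB_exists (t : Int) (arr : List Int) (m j i : Nat) (hj : j < m) (hij : i < j)
    (hsum : pvG arr i + pvG arr j = t) : ∃ i0, (i0, j) ∈ pvPairsBU t arr m := by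
  have hs : ((List.range j).find? (fun i => pvG arr i == t - pvG arr j)).isSome := by
    rw [List.find?_isSome]
    exact ⟨i, by simp [List.mem_range, hij], by simp; omega⟩
  obtain ⟨i0, hi0⟩ := Option.isSome_iff_exists.mp hs
  refine ⟨i0, ?_⟩
  simp only [pvPairsBU, List.mem_filterMap, List.mem_range]
  exact ⟨j, hj, by simp [pvF, hi0]⟩

lemma pvB_pairwise (t : Int) (arr : List Int) (m : Nat) :
    (pvPairsBU t arr m).Pairwise (fun p q => p.2 < q.2) := by
  induction m with
  | zero => simp [pvPairsBU]
  | succ k ih =>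
    unfold pvPairsBU at ih ⊢
    rw [List.range_succ, List.filterMap_append, List.pairwise_append]
    refine ⟨ih, ?_, ?_⟩
    · cases hF : pvF t arr k <;> simp [hF]
    · intro p hp q hq
      have hpk : p.2 < k := (pvMemB t arr k p hp).1
      simp only [List.filterMap_cons, List.filterMap_nil] at hq
      cases hF : pvF t arr k with
      | none => rw [hF] at hq; simp at hq
      | some z =>
        rw [hF] at hq
        simp at hq
        subst hq
        have : q.2 = k := by
          simp only [pvF, Option.map_eq_some_iff] at hF
          obtain ⟨i0, _, rfl⟩ := hF
          rfl
        omega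

-- A's scan order on pairs
def pvLex (p q : Nat × Nat) : Prop := p.1 < q.1 ∨ (p.1 = q.1 ∧ p.2 < q.2)

lemma pvRowA_mem (t : Int) (arr : List Int) (i : Nat) (js : List Nat) (p : Nat × Nat)
    (h : p ∈ pvRowA t arr i js) : p.1 = i ∧ p.2 ∈ js := by
  simp only [pvRowA, List.mem_map, List.mem_filter] at h
  obtain ⟨j, ⟨hj, _⟩, rfl⟩ := h
  exact ⟨rfl, hj⟩

lemma pvA_pairwise (t : Int) (arr : List Int) : (pvPairsA t arr).Pairwise pvLex := by
  unfold pvPairsA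
  rw [List.pairwise_flatMap]
  constructor
  · intro i _
    unfold pvRowA
    rw [List.pairwise_map]
    refine List.Pairwise.filter _ ?_
    unfold pvJs
    rw [List.pairwise_map]
    refine List.Pairwise.imp ?_ (List.pairwise_lt_range)
    intro a b hab
    exact Or.inr ⟨rfl, by omega⟩
  · refine List.Pairwise.imp ?_ (List.pairwise_lt_range)
    intro a b hab x hx y hy
    have hxa := (pvRowA_mem t arr a _ x hx).1
    have hyb := (pvRowA_mem t arr b _ y hy).1
    exact Or.inl (by omega)

-- the heart: both scans pick the same pair
lemma pvMain (t : Int) (arr : List Int) :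
    pvBest arr (pvPairsA t arr) = pvBest arr (pvPairsBU t arr arr.length) := by
  cases hB : (pvPairsBU t arr arr.length).foldl (pvStep arr) none with
  | none =>
    have hBnil : pvPairsBU t arr arr.length = [] := (pvBest_none_iff arr _).mp hB
    have hAnil : pvPairsA t arr = [] := by
      by_contra h
      obtain ⟨p, hp⟩ := List.exists_mem_of_ne_nil _ h
      obtain ⟨h1, h2, h3⟩ := (pvMemA t arr p).mp hp
      obtain ⟨i0, hi0⟩ := pvB_exists t arr arr.length p.2 p.1 h2 h1 h3
      rw [hBnil] at hi0
      simp at hi0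
    rw [pvBest, pvBest, hAnil, hBnil]
  | some pB =>
    obtain ⟨iB, jB⟩ := pB
    obtain ⟨l1, l2, hdec, hl1⟩ := pvBest_decomp arr _ _ hB
    have hmemB : (iB, jB) ∈ pvPairsBU t arr arr.length := by rw [hdec]; simp
    obtain ⟨hjn, hfind⟩ := pvMemB t arr arr.length (iB, jB) hmemB
    have hiBjB : iB < jB := by
      have := List.mem_of_find?_eq_some hfind
      simpa [List.mem_range] using this
    have hGiB : pvG arr iB = t - pvG arr jB := by
      have := List.find?_some hfind
      simpa using this
    have hmin : ∀ i' < iB, pvG arr i' ≠ t - pvG arr jB := by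
      intro i' hi' hcontra
      have := pvFind_range_min jB _ iB hfind i' hi'
      simp [hcontra] at this
    have hub_B : ∀ q ∈ pvPairsBU t arr arr.length, pvKey arr q ≤ pvKey arr (iB, jB) :=
      pvBest_ub arr _ _ hB
    -- any B-pair strictly earlier (smaller second component) has a strictly smaller key
    have hlow : ∀ q ∈ pvPairsBU t arr arr.length, q.2 < jB → pvKey arr q < pvKey arr (iB, jB) := by
      intro q hq hq2
      have hpw := pvB_pairwise t arr arr.length
      rw [hdec] at hpw hq
      rcases List.mem_append.mp hq with hq' | hq'
      · exact hl1 q hq'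
      · rcases List.mem_cons.mp hq' with rfl | hq'
        · omega
        · exfalso
          obtain ⟨_, hpw2, _⟩ := List.pairwise_append.mp hpw
          have := (List.pairwise_cons.mp hpw2).1 q hq'
          omega
    -- every A-pair has a same-key B-entry with the same second component
    have hentry : ∀ p ∈ pvPairsA t arr, ∃ i0, (i0, p.2) ∈ pvPairsBU t arr arr.length ∧
        pvKey arr (i0, p.2) = pvKey arr p := by
      intro p hp
      obtain ⟨h1, h2, h3⟩ := (pvMemA t arr p).mp hp
      obtain ⟨i0, hi0⟩ := pvB_exists t arr arr.length p.2 p.1 h2 h1 h3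
      obtain ⟨_, hf⟩ := pvMemB t arr arr.length (i0, p.2) hi0
      have hg : pvG arr i0 = t - pvG arr p.2 := by simpa using List.find?_some hf
      have hg' : pvG arr i0 = pvG arr p.1 := by omega
      exact ⟨i0, hi0, by simp [pvKey, hg']⟩
    have hub_A : ∀ p ∈ pvPairsA t arr, pvKey arr p ≤ pvKey arr (iB, jB) := by
      intro p hp
      obtain ⟨i0, hm, he⟩ := hentry p hp
      exact he ▸ hub_B _ hm
    have hmemA : (iB, jB) ∈ pvPairsA t arr := (pvMemA t arr _).mpr ⟨hiBjB, hjn, by simp; omega⟩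
    -- the combinatorial core: an A-pair scanned before (iB, jB) has a strictly smaller key
    have hlex : ∀ q ∈ pvPairsA t arr, pvLex q (iB, jB) → pvKey arr q < pvKey arr (iB, jB) := by
      intro q hq hql
      obtain ⟨h1, h2, h3⟩ := (pvMemA t arr q).mp hq
      by_contra hnot
      have hqM : pvKey arr q = pvKey arr (iB, jB) := le_antisymm (hub_A q hq) (not_lt.mp hnot)
      by_cases hj : q.2 < jB
      · -- a B-entry at q.2 would already have the maximal key before jB
        obtain ⟨i0, hm, he⟩ := hentry q hq
        have := hlow (i0, q.2) hm hj
        rw [he, hqM] at this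
        exact lt_irrefl _ this
      · -- so q.1 < iB
        have hi : q.1 < iB := by
          rcases hql with h | ⟨_, h⟩
          · exact h
          · omega
        by_cases hgi : pvG arr q.1 = pvG arr iB
        · exact hmin q.1 hi (by omega)
        · -- cross pair (q.1, iB) sums to t, giving a maximal-key B-entry before jB
          have hsum2 : pvG arr q.1 + pvG arr iB = t := by
            have hq1 := le_max_left (pvG arr q.1) (pvG arr q.2)
            have hq2 := le_max_right (pvG arr q.1) (pvG arr q.2)
            have hb1 := le_max_left (pvG arr iB) (pvG arr jB)
            have hb2 := le_max_right (pvG arr iB) (pvG arr jB)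
            have hc1 := max_choice (pvG arr q.1) (pvG arr q.2)
            have hc2 := max_choice (pvG arr iB) (pvG arr jB)
            simp only [pvKey] at hqM
            rcases hc1 with h | h <;> rcases hc2 with h' | h' <;> omega
          obtain ⟨i0, hi0⟩ := pvB_exists t arr arr.length iB q.1 (by omega) hi hsum2
          obtain ⟨_, hf⟩ := pvMemB t arr arr.length (i0, iB) hi0
          have hg0 : pvG arr i0 = t - pvG arr iB := by simpa using List.find?_some hf
          have hkey0 : pvKey arr (i0, iB) = pvKey arr (iB, jB) := by
            simp only [pvKey]
            have : pvG arr i0 = pvG arr jB := by omega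
            rw [this, max_comm]
          have := hlow (i0, iB) hi0 hiBjB
          rw [hkey0] at this
          exact lt_irrefl _ this
    have := pvBest_first arr pvLex (pvPairsA t arr) (iB, jB)
      (pvA_pairwise t arr) hmemA hlex hub_A
    rw [pvBest, pvBest, hB, this]

-- ===== VERDICT (by name: the statement is the Claim_ definition above) =====
theorem selectPairs_spec : Claim_equal_selectPairs := by
  intro t arr _
  unfold Spec_selectPairs
  rw [pvA_eq, pvB_eq, pvMain]
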